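-- pv_equiv track=rewrite | github.com/hansied67/advent_of_code_2020 | day6/day6.py | count_unanimous_answers
-- ===== SOURCE A (Python) =====
-- def count_unanimous_answers(survey_result: list) -> int:
--     unanimous_answers_temp = survey_result[0]
--     unanimous_answers = survey_result[0]
--
--     if len(survey_result) != 1:
--         for answer_block in survey_result[1:]:
--             for answer in unanimous_answers_temp:
--                 if answer not in answer_block and unanimous_answers:
--                     unanimous_answers = unanimous_answers.replace(answer, '')
--
--     return len(unanimous_answers)
-- ===== SOURCE B (Python) =====
-- def count_unanimous_answers(survey_result: list) -> int:
--     common = set(survey_result[0])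
--     for block in survey_result[1:]:
--         common &= set(block)
--     return sum(1 for c in survey_result[0] if c in common)
-- ===== Notes on version B (the rewrite author's own statement) =====
-- stated objective: simpler
-- what changed: Replaces A's nested loop that repeatedly mutates the surviving string with .replace by a single fold intersecting character sets, followed by one counting pass over the first block with multiplicity.
import Mathlib
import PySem

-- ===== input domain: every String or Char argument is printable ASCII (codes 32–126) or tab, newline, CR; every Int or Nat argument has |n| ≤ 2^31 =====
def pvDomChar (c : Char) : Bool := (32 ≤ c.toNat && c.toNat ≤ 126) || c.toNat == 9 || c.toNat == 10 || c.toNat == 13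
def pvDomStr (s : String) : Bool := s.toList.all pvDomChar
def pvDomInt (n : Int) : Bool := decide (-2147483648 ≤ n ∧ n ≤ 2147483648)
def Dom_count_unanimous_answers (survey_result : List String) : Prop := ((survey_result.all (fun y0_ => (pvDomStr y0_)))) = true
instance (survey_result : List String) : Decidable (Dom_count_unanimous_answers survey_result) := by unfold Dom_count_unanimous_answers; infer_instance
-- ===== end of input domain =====

-- B replaces A's nested per-character `.replace` mutation loop by one fold of set
-- intersections plus a separate counting pass over the first block (simpler).

-- ===== PORT A =====
def count_unanimous_answers (survey_result : List String) : Int :=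
  match survey_result with
  | [] => 0  -- Python raises IndexError on survey_result[0]; excluded by Pre_
  | first :: rest =>
    let unanimous_answers_temp := first.toList
    let unanimous_answers :=
      if survey_result.length ≠ 1 then
        rest.foldl (fun ua answer_block =>
          unanimous_answers_temp.foldl (fun ua answer =>
            if PySem.Chars.isIn [answer] answer_block.toList = false ∧ ua ≠ [] then
              PySem.Chars.replace ua [answer] []
            else ua) ua) unanimous_answers_temp
      else unanimous_answers_temp
    (unanimous_answers.length : Int)

-- ===== PORT B =====
def count_unanimous_answers_alt (survey_result : List String) : Int :=
  match survey_result with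
  | [] => 0  -- Python raises IndexError on survey_result[0]; excluded by Pre_
  | first :: rest =>
    let common := rest.foldl
      (fun s block => PySem.Set.inter s (PySem.Set.ofList block.toList))
      (PySem.Set.ofList first.toList)
    ((first.toList.countP (fun c => common.contains c) : Int))

-- ===== PRECONDITION & SPEC =====
-- Pre_ excludes only the empty list, on which Python A raises IndexError.
def Pre_count_unanimous_answers (survey_result : List String) : Prop := survey_result ≠ []
instance (survey_result : List String) : Decidable (Pre_count_unanimous_answers survey_result) := by unfold Pre_count_unanimous_answers; infer_instance

def pvWitness_count_unanimous_answers : List String := ["ab", "b"]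

def Spec_count_unanimous_answers (survey_result : List String) (out : Int) : Prop := out = count_unanimous_answers_alt survey_result
instance (survey_result : List String) (out : Int) : Decidable (Spec_count_unanimous_answers survey_result out) := by unfold Spec_count_unanimous_answers; infer_instance

-- ===== CLAIM (what is proved, stated in full; the proofs are below) =====
def Claim_equal_count_unanimous_answers : Prop := ∀ (survey_result : List String), Dom_count_unanimous_answers survey_result → Pre_count_unanimous_answers survey_result → Spec_count_unanimous_answers survey_result (count_unanimous_answers survey_result)

-- ===== LEMMAS AND PROOFS =====

-- str.replace(c, '') deletes every occurrence of the single character c.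
theorem replace_go_singleton (a : Char) :
    ∀ (fuel : Nat) (l acc : List Char), l.length ≤ fuel →
      PySem.Chars.replace.go [a] [] fuel l acc
        = acc.reverse ++ l.filter (fun c => c ≠ a) := by
  intro fuel
  induction fuel with
  | zero =>
    intro l acc h
    have : l = [] := List.eq_nil_of_length_eq_zero (Nat.le_zero.mp h)
    subst this
    simp [PySem.Chars.replace.go]
  | succ n ih =>
    intro l acc h
    cases l with
    | nil => simp [PySem.Chars.replace.go]
    | cons c t =>
      simp only [PySem.Chars.replace.go]
      by_cases hc : c = a
      · subst hc
        have hpre : [c].isPrefixOf (c :: t) = true := by simp [List.isPrefixOf]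
        rw [if_pos hpre]
        simp only [List.length_cons] at h
        rw [ih _ _ (by simpa using Nat.le_of_succ_le_succ h)]
        simp
      · have hpre : [a].isPrefixOf (c :: t) = false := by
          simp [List.isPrefixOf]; exact fun hh => absurd hh.symm hc
        rw [if_neg (by simp [hpre])]
        simp only [List.length_cons] at h
        rw [ih _ _ (Nat.le_of_succ_le_succ h)]
        simp [hc]

theorem replace_singleton (s : List Char) (a : Char) :
    PySem.Chars.replace s [a] [] = s.filter (fun c => c ≠ a) := by
  rw [PySem.Chars.replace]
  simp only [List.isEmpty_cons, if_false, Bool.false_eq_true]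
  simpa using replace_go_singleton a s.length s [] le_rfl

-- single-character membership test
theorem isIn_singleton (a : Char) (l : List Char) :
    PySem.Chars.isIn [a] l = l.contains a := by
  by_cases h : a ∈ l
  · have h1 : [a] <:+: l := by
      obtain ⟨s, t, rfl⟩ := List.append_of_mem h
      exact ⟨s, t, by simp⟩
    rw [show PySem.Chars.isIn [a] l = true from (PySem.Chars.isIn_iff_infix _ _).mpr h1]
    symm
    simpa [List.contains_iff_mem] using h
  · have h1 : ¬ [a] <:+: l := fun hc => h (hc.subset (by simp))
    rw [show PySem.Chars.isIn [a] l = false from (PySem.Chars.isIn_eq_false_iff _ _).mpr h1]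
    symm
    simpa [List.contains_iff_mem] using h

-- A's inner loop over the characters of cs, with the truthiness guard, is one filter.
theorem inner_loop_filter (b : String) :
    ∀ (cs ua : List Char),
      cs.foldl (fun u a =>
          if PySem.Chars.isIn [a] b.toList = false ∧ u ≠ [] then
            PySem.Chars.replace u [a] []
          else u) ua
        = ua.filter (fun x => b.toList.contains x || !(cs.contains x)) := by
  intro cs
  induction cs with
  | nil => intro ua; simp
  | cons a cs ih =>
    intro ua
    simp only [List.foldl_cons]
    by_cases hb : a ∈ b.toList
    · rw [if_neg (by simp [isIn_singleton, hb]), ih]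
      apply List.filter_congr
      intro x _
      by_cases hx : x = a
      · subst hx; simp [hb]
      · simp [hx]
    · have hbf : PySem.Chars.isIn [a] b.toList = false := by
        rw [isIn_singleton]; simpa [List.contains_iff_mem] using hb
      by_cases hua : ua = []
      · subst hua; simp [ih]
      · rw [if_pos ⟨hbf, hua⟩, replace_singleton, ih, List.filter_filter]
        apply List.filter_congr
        intro x _
        by_cases hx : x = a
        · subst hx; simp [hb]
        · simp [hx]

-- A's outer loop: fold over the remaining blocks is one filter.
theorem outer_loop_filter (temp : List Char) :
    ∀ (rest : List String) (ua : List Char),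
      rest.foldl (fun ua answer_block =>
          temp.foldl (fun ua answer =>
            if PySem.Chars.isIn [answer] answer_block.toList = false ∧ ua ≠ [] then
              PySem.Chars.replace ua [answer] []
            else ua) ua) ua
        = ua.filter (fun x => !(temp.contains x) || rest.all (fun b => b.toList.contains x)) := by
  intro rest
  induction rest with
  | nil => intro ua; simp
  | cons b rest ih =>
    intro ua
    simp only [List.foldl_cons]
    rw [inner_loop_filter b temp ua, ih, List.filter_filter]
    apply List.filter_congr
    intro x _
    by_cases ht : x ∈ temp
    · simp [ht, Bool.and_comm]
    · simp [ht]

-- B's fold of intersections: membership characterisation.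
theorem common_mem (x : Char) :
    ∀ (rest : List String) (s : List Char),
      (x ∈ rest.foldl (fun s block => PySem.Set.inter s (PySem.Set.ofList block.toList)) s)
        ↔ (x ∈ s ∧ ∀ b ∈ rest, x ∈ b.toList) := by
  intro rest
  induction rest with
  | nil => intro s; simp
  | cons b rest ih =>
    intro s
    simp only [List.foldl_cons]
    rw [ih]
    constructor
    · rintro ⟨hi, hall⟩
      have := (PySem.Set.mem_inter _ _ _).mp hi
      exact ⟨this.1, by
        intro b' hb'
        rcases List.mem_cons.mp hb' with h | h
        · subst h; simpa [PySem.Set.mem_ofList _ _] using this.2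
        · exact hall b' h⟩
    · rintro ⟨hs, hall⟩
      refine ⟨(PySem.Set.mem_inter _ _ _).mpr ⟨hs, ?_⟩, fun b' hb' => hall b' (List.mem_cons_of_mem _ hb')⟩
      rw [PySem.Set.mem_ofList]
      exact hall b (by simp)

-- ===== VERDICT (by name: the statement is the Claim_ definition above) =====
theorem count_unanimous_answers_spec : Claim_equal_count_unanimous_answers := by
  intro survey_result _ hpre
  unfold Spec_count_unanimous_answers
  match survey_result with
  | [] => exact absurd rfl hpre
  | first :: rest =>
    unfold count_unanimous_answers count_unanimous_answers_alt
    simp only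
    set temp := first.toList with htemp
    have hbody :
        (if (first :: rest).length ≠ 1 then
          rest.foldl (fun ua answer_block =>
            temp.foldl (fun ua answer =>
              if PySem.Chars.isIn [answer] answer_block.toList = false ∧ ua ≠ [] then
                PySem.Chars.replace ua [answer] []
              else ua) ua) temp
        else temp)
          = temp.filter (fun x => !(temp.contains x) || rest.all (fun b => b.toList.contains x)) := by
      by_cases h1 : (first :: rest).length ≠ 1
      · rw [if_pos h1, outer_loop_filter]
      · rw [if_neg h1]
        have : rest = [] := by
          simp only [List.length_cons, ne_eq, not_not] at h1
          exact List.eq_nil_of_length_eq_zero (by omega)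
        subst this
        simp
    rw [hbody]
    have hfilter :
        temp.filter (fun x => !(temp.contains x) || rest.all (fun b => b.toList.contains x))
          = temp.filter (fun c =>
              (rest.foldl (fun s block => PySem.Set.inter s (PySem.Set.ofList block.toList))
                (PySem.Set.ofList temp)).contains c) := by
      apply List.filter_congr
      intro x hx
      have hxt : temp.contains x = true := List.contains_iff_mem.mpr hx
      have hcm := common_mem x rest (PySem.Set.ofList temp)
      simp only [hxt, Bool.not_true, Bool.false_or]
      rw [Bool.eq_iff_iff]
      simp only [List.all_eq_true, List.contains_iff_mem]
      constructor
      · intro hall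
        exact List.contains_iff_mem.mpr (hcm.mpr ⟨(PySem.Set.mem_ofList _ _).mpr hx, hall⟩)
      · intro hmem
        exact (hcm.mp (List.contains_iff_mem.mp hmem)).2
    rw [hfilter, List.countP_eq_length_filter]
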